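-- pv_equiv track=rewrite | github.com/Sakshamkgoyal/Pdf_Splitter_Excel_Naming | pdf-excel.py | resolve_duplicate_filenames
-- ===== SOURCE A (Python) =====
-- from collections import defaultdict
--
-- def resolve_duplicate_filenames(names):
--     name_count = defaultdict(int)
--     final_names = []
--     for name in names:
--         base, ext = name.rsplit(".", 1)
--         count = name_count[base]
--         if count == 0:
--             final_names.append(f"{base}.{ext}")
--         else:
--             final_names.append(f"{base}_{count}.{ext}")
--         name_count[base] += 1
--     return final_names
-- ===== SOURCE B (Python) =====
-- def resolve_duplicate_filenames(names):
--     # group-then-assign: build base -> ordered [(index, ext)], then scatter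
--     # the formatted names back to their original positions.
--     groups = {}
--     for idx, name in enumerate(names):
--         base, ext = name.rsplit(".", 1)
--         groups.setdefault(base, []).append((idx, ext))
--     assigned = {}
--     for base, occs in groups.items():
--         for k, (idx, ext) in enumerate(occs):
--             assigned[idx] = f"{base}.{ext}" if k == 0 else f"{base}_{k}.{ext}"
--     return [assigned[i] for i in range(len(names))]
-- ===== Notes on version B (the rewrite author's own statement) =====
-- stated objective: alternative
-- what changed: B replaces A's single scan with a running per-base counter by a group-then-scatter scheme: one pass groups each base to the ordered list of (index, ext) occurrences, a second pass enumerates each group and scatters the formatted names back to their original indices, and the result is read off by position.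
import Mathlib
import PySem

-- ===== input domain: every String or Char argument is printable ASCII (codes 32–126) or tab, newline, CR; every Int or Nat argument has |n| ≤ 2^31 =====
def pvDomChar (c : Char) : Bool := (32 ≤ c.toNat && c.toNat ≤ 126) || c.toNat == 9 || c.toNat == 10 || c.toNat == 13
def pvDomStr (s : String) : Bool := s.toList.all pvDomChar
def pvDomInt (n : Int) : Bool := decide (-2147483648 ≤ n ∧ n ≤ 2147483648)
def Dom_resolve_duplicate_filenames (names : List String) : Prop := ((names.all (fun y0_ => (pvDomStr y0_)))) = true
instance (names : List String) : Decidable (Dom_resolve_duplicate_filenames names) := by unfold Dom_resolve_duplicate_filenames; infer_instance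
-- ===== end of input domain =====

-- B replaces A's running-counter scan by a group-then-scatter decomposition (group bases to
-- ordered occurrence lists, then place formatted names back at their original indices): an
-- alternative decomposition of the same cost, not claimed faster.


-- ===== PORT A =====
-- shared primitive: name.rsplit(".", 1) unpacked into (base, ext); none = no '.' (Python: ValueError)
def pvRsplitDot (cs : List Char) : Option (List Char × List Char) :=
  match cs with
  | [] => none
  | c :: rest =>
    match pvRsplitDot rest with
    | some (b, e) => some (c :: b, e)
    | none => if c = '.' then some ([], rest) else none

-- f"{base}.{ext}" / f"{base}_{k}.{ext}" depending on the count k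
def pvFmt (b e : List Char) (k : Nat) : String :=
  if k = 0 then String.ofList (b ++ '.' :: e)
  else String.ofList (b ++ '_' :: PySem.Int.toChars (k : Int) ++ '.' :: e)

-- the body of A's for-loop (state = (name_count, final_names))
def pvStepA (st : PySem.Dict String Int × List String) (name : String) :
    PySem.Dict String Int × List String :=
  match pvRsplitDot name.toList with
  | none => st  -- Python raises ValueError here; excluded by Pre_
  | some (b, e) =>
    let base : String := String.ofList b
    let count : Int := st.1.getD base 0
    let fn : String :=
      if count = 0 then String.ofList (b ++ '.' :: e)
      else String.ofList (b ++ '_' :: PySem.Int.toChars count ++ '.' :: e)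
    (st.1.insert base (count + 1), st.2 ++ [fn])

def resolve_duplicate_filenames (names : List String) : List String :=
  (names.foldl pvStepA (PySem.Dict.empty, [])).2

-- ===== PORT B =====
-- phase 1 step: groups.setdefault(base, []).append((idx, ext))
def pvStepB1 (d : PySem.Dict String (List (Nat × List Char))) (p : String × Nat) :
    PySem.Dict String (List (Nat × List Char)) :=
  match pvRsplitDot p.1.toList with
  | none => d  -- Python raises ValueError here; excluded by Pre_
  | some (b, e) => d.modify (String.ofList b) [] (fun v => v ++ [(p.2, e)])

-- phase 2 inner loop: for k, (idx, ext) in enumerate(occs): assigned[idx] = …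
def pvInnerB (q : String × List (Nat × List Char)) (A : PySem.Dict Nat String) :
    PySem.Dict Nat String :=
  (q.2.zipIdx).foldl (fun A r => A.insert r.1.1 (pvFmt q.1.toList r.1.2 r.2)) A

def resolve_duplicate_filenames_alt (names : List String) : List String :=
  let groups := names.zipIdx.foldl pvStepB1 PySem.Dict.empty
  let assigned := groups.items.foldl (fun A q => pvInnerB q A) PySem.Dict.empty
  -- assigned[i]: under Pre_ every index 0..n-1 is a key, so the default is never read
  (List.range names.length).map (fun i => assigned.getD i "")

-- ===== PRECONDITION & SPEC =====
-- Pre_ excludes exactly the inputs on which A raises ValueError: a name without a '.'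
def Pre_resolve_duplicate_filenames (names : List String) : Prop :=
  (names.all (fun n => n.toList.contains '.')) = true
instance (names : List String) : Decidable (Pre_resolve_duplicate_filenames names) := by
  unfold Pre_resolve_duplicate_filenames; infer_instance

def pvWitness_resolve_duplicate_filenames : List String := ["a.pdf", "a.pdf", "b.pdf", "a.pdf"]

def Spec_resolve_duplicate_filenames (names : List String) (out : List String) : Prop :=
  out = resolve_duplicate_filenames_alt names
instance (names : List String) (out : List String) : Decidable (Spec_resolve_duplicate_filenames names out) := by
  unfold Spec_resolve_duplicate_filenames; infer_instance

-- ===== CLAIM (what is proved, stated in full; the proofs are below) =====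
def Claim_equal_resolve_duplicate_filenames : Prop := ∀ (names : List String), Dom_resolve_duplicate_filenames names → Pre_resolve_duplicate_filenames names → Spec_resolve_duplicate_filenames names (resolve_duplicate_filenames names)

-- ===== LEMMAS AND PROOFS =====

-- number of earlier occurrences of base b among the processed prefix
def pvCnt (pre : List (Option (List Char × List Char))) (b : List Char) : Nat :=
  pre.countP (fun q => (q.map Prod.fst) == some b)

-- the common reference value: position-by-position emission with prefix counts
def pvBRec (pre rest : List (Option (List Char × List Char))) : List String :=
  match rest with
  | [] => []
  | p :: rs =>
    (match p with
     | none => ""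
     | some (b, e) => pvFmt b e (pvCnt pre b))
      :: pvBRec (pre ++ [p]) rs

lemma pvRsplitDot_ne_none (cs : List Char) (h : cs.contains '.' = true) :
    pvRsplitDot cs ≠ none := by
  induction cs with
  | nil => simp at h
  | cons c rest ih =>
    simp only [pvRsplitDot]
    rcases hr : pvRsplitDot rest with _ | ⟨b, e⟩
    · by_cases hc : c = '.'
      · simp [hc]
      · have h2 : rest.contains '.' = true := by
          simp only [List.contains_cons] at h
          rcases Bool.or_eq_true_iff.mp h with h1 | h2
          · exact absurd (beq_iff_eq.mp h1).symm hc
          · exact h2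
        exact absurd hr (ih h2)
    · simp

lemma pvCnt_append_singleton (pre : List (Option (List Char × List Char)))
    (p : Option (List Char × List Char)) (b : List Char) :
    pvCnt (pre ++ [p]) b = pvCnt pre b + (if (p.map Prod.fst) = some b then 1 else 0) := by
  simp only [pvCnt, List.countP_append, List.countP_cons, List.countP_nil]
  by_cases hh : Option.map Prod.fst p = some b <;> simp [hh]

-- ---------- A-side: the running-counter fold emits pvBRec ----------

lemma pvA_loop (nrest : List String) :
    ∀ (pre : List (Option (List Char × List Char))) (d : PySem.Dict String Int)
      (acc : List String),
    (∀ n ∈ nrest, pvRsplitDot n.toList ≠ none) →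
    (∀ b : List Char, d.getD (String.ofList b) 0 = (pvCnt pre b : Int)) →
    (nrest.foldl pvStepA (d, acc)).2 =
      acc ++ pvBRec pre (nrest.map (fun n => pvRsplitDot n.toList)) := by
  induction nrest with
  | nil => intro pre d acc _ _; simp [pvBRec]
  | cons n ns ih =>
    intro pre d acc hsome hinv
    rcases hp : pvRsplitDot n.toList with _ | ⟨b, e⟩
    · exact absurd hp (hsome n (by simp))
    have hcount : d.getD (String.ofList b) 0 = (pvCnt pre b : Int) := hinv b
    have hinv' : ∀ b' : List Char,
        (d.insert (String.ofList b) (d.getD (String.ofList b) 0 + 1)).getD (String.ofList b') 0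
          = (pvCnt (pre ++ [some (b, e)]) b' : Int) := by
      intro b'
      rw [PySem.Dict.getD_insert, pvCnt_append_singleton]
      by_cases hb : b' = b
      · subst hb
        simp [hcount]
      · have hne : String.ofList b' ≠ String.ofList b := fun hh => hb (String.ofList_inj.mp hh)
        have hne2 : ¬ b = b' := fun hh => hb hh.symm
        simp [hne, hinv b', hne2]
    have hstep : pvStepA (d, acc) n =
        (d.insert (String.ofList b) (d.getD (String.ofList b) 0 + 1),
         acc ++ [pvFmt b e (pvCnt pre b)]) := by
      simp only [pvStepA, hp, hcount, pvFmt]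
      congr 1
      by_cases h0 : pvCnt pre b = 0
      · simp [h0]
      · have : ((pvCnt pre b : Nat) : Int) ≠ 0 := by exact_mod_cast h0
        simp [h0]
    simp only [List.foldl_cons, hstep]
    rw [ih (pre ++ [some (b, e)]) _ _ (fun m hm => hsome m (by simp [hm])) hinv']
    simp [pvBRec, hp]

lemma pvDict_empty_inv (b : List Char) :
    (PySem.Dict.empty : PySem.Dict String Int).getD (String.ofList b) 0 = (pvCnt [] b : Int) := by
  simp [PySem.Dict.getD_empty, pvCnt]

-- ---------- B-side: grouping ----------

-- the flat key/occurrence list that phase 1 effectively folds over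
def pvL (ps : List (Option (List Char × List Char))) (k : Nat) :
    List (String × (Nat × List Char)) :=
  match ps with
  | [] => []
  | none :: t => pvL t (k + 1)
  | some (b, e) :: t => (String.ofList b, (k, e)) :: pvL t (k + 1)

-- the occurrence list of key s
def pvGrp (ps : List (Option (List Char × List Char))) (k : Nat) (s : String) :
    List (Nat × List Char) :=
  ((pvL ps k).filter (fun p => p.1 == s)).map (fun p => p.2)

lemma pvFold1_eq (ns : List String) :
    ∀ (k : Nat) (d : PySem.Dict String (List (Nat × List Char))),
    (ns.zipIdx k).foldl pvStepB1 d =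
      (pvL (ns.map (fun n => pvRsplitDot n.toList)) k).foldl
        (fun d p => d.modify p.1 [] (fun v => v ++ [p.2])) d := by
  induction ns with
  | nil => intro k d; simp [pvL]
  | cons n t ih =>
    intro k d
    rcases hp : pvRsplitDot n.toList with _ | ⟨b, e⟩ <;>
      simp [List.zipIdx_cons, pvStepB1, hp, pvL, ih]

lemma pvGrp_getD (ps : List (Option (List Char × List Char))) (s : String) :
    ((pvL ps 0).foldl (fun d p => d.modify p.1 [] (fun v => v ++ [p.2]))
        (PySem.Dict.empty : PySem.Dict String (List (Nat × List Char)))).getD s []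
      = pvGrp ps 0 s := by
  rw [PySem.Dict.getD_foldl_modify_append]
  simp [pvGrp, PySem.Dict.getD_empty]

lemma pvGrp_get (ps : List (Option (List Char × List Char))) :
    ∀ (j k : Nat) (b e : List Char), ps[j]? = some (some (b, e)) →
    (pvGrp ps k (String.ofList b))[pvCnt (ps.take j) b]? = some (k + j, e) := by
  induction ps with
  | nil => intro j k b e h; simp at h
  | cons p t ih =>
    intro j k b e h
    cases j with
    | zero =>
      simp only [List.getElem?_cons_zero, Option.some_inj] at h
      subst h
      simp [pvGrp, pvL, pvCnt]
    | succ j =>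
      simp only [List.getElem?_cons_succ] at h
      have htail := ih j (k + 1) b e h
      rcases p with _ | ⟨b0, e0⟩
      · have : pvCnt ((none : Option (List Char × List Char)) :: t.take j) b
            = pvCnt (t.take j) b := by simp [pvCnt]
        simpa [pvGrp, pvL, List.take_succ_cons, this, Nat.add_assoc, Nat.add_comm 1 j] using htail
      · by_cases hb : b0 = b
        · subst hb
          have hcnt : pvCnt (some (b0, e0) :: t.take j) b0 = pvCnt (t.take j) b0 + 1 := by
            simp [pvCnt]
          simpa [pvGrp, pvL, List.take_succ_cons, hcnt, Nat.add_assoc, Nat.add_comm 1 j] using htail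
        · have hne : (String.ofList b0 == String.ofList b) = false := by
            simp [String.ofList_inj, hb]
          have hcnt : pvCnt (some (b0, e0) :: t.take j) b = pvCnt (t.take j) b := by
            simp [pvCnt, hb]
          simpa [pvGrp, pvL, List.take_succ_cons, hne, hcnt, Nat.add_assoc,
                 Nat.add_comm 1 j] using htail

lemma pvGrp_mem (ps : List (Option (List Char × List Char))) :
    ∀ (k : Nat) (s : String) (i : Nat) (e : List Char), (i, e) ∈ pvGrp ps k s →
    ∃ j b', ps[j]? = some (some (b', e)) ∧ i = k + j ∧ String.ofList b' = s := by
  induction ps with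
  | nil => intro k s i e h; simp [pvGrp, pvL] at h
  | cons p t ih =>
    intro k s i e h
    rcases p with _ | ⟨b0, e0⟩
    · obtain ⟨j, b', hj, hi, hs⟩ := ih (k + 1) s i e (by simpa [pvGrp, pvL] using h)
      exact ⟨j + 1, b', by simpa using hj, by omega, hs⟩
    · by_cases hs0 : String.ofList b0 = s
      · rcases (by simpa [pvGrp, pvL, hs0] using h :
            (i = k ∧ e = e0) ∨ (i, e) ∈ pvGrp t (k + 1) s) with ⟨hik, hee⟩ | hmem
        · exact ⟨0, b0, by simp [hee], by omega, hs0⟩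
        · obtain ⟨j, b', hj, hi, hs⟩ := ih (k + 1) s i e hmem
          exact ⟨j + 1, b', by simpa using hj, by omega, hs⟩
      · have : (String.ofList b0 == s) = false := by simp [hs0]
        obtain ⟨j, b', hj, hi, hs⟩ := ih (k + 1) s i e (by simpa [pvGrp, pvL, this] using h)
        exact ⟨j + 1, b', by simpa using hj, by omega, hs⟩

lemma pvGrp_fst_ge (ps : List (Option (List Char × List Char))) (k : Nat) (s : String)
    (i : Nat) (hi : i ∈ (pvGrp ps k s).map Prod.fst) : k ≤ i := by
  simp only [List.mem_map] at hi
  obtain ⟨⟨i', e⟩, hmem, rfl⟩ := hi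
  obtain ⟨j, _, _, hij, _⟩ := pvGrp_mem ps k s i' e hmem
  omega

lemma pvGrp_nodup_fst (ps : List (Option (List Char × List Char))) :
    ∀ (k : Nat) (s : String), ((pvGrp ps k s).map Prod.fst).Nodup := by
  induction ps with
  | nil => intro k s; simp [pvGrp, pvL]
  | cons p t ih =>
    intro k s
    rcases p with _ | ⟨b0, e0⟩
    · simpa [pvGrp, pvL] using ih (k + 1) s
    · by_cases hs0 : (String.ofList b0 == s) = true
      · have : pvGrp (some (b0, e0) :: t) k s = (k, e0) :: pvGrp t (k + 1) s := by
          simp [pvGrp, pvL, hs0]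
        rw [this]
        simp only [List.map_cons, List.nodup_cons]
        refine ⟨fun hk => ?_, ih (k + 1) s⟩
        have := pvGrp_fst_ge t (k + 1) s k hk
        omega
      · have : pvGrp (some (b0, e0) :: t) k s = pvGrp t (k + 1) s := by
          simp [pvGrp, pvL, Bool.eq_false_iff.mpr (fun h => hs0 h)]
        rw [this]; exact ih (k + 1) s
    
lemma pvGrp_other_base (ps : List (Option (List Char × List Char))) (j : Nat)
    (b e : List Char) (s : String) (hj : ps[j]? = some (some (b, e)))
    (hs : s ≠ String.ofList b) : j ∉ (pvGrp ps 0 s).map Prod.fst := by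
  intro hmem
  simp only [List.mem_map] at hmem
  obtain ⟨⟨i', e'⟩, hmem, hfst⟩ := hmem
  obtain ⟨j', b', hj', hij, hs'⟩ := pvGrp_mem ps 0 s i' e' hmem
  have : j' = j := by omega
  subst this
  rw [hj] at hj'
  have hbb : b = b' ∧ e = e' := by simpa using hj'
  exact hs (by rw [hbb.1]; exact hs'.symm)

lemma pvL_fst_mem (ps : List (Option (List Char × List Char))) :
    ∀ (j k : Nat) (b e : List Char), ps[j]? = some (some (b, e)) →
    String.ofList b ∈ (pvL ps k).map Prod.fst := by
  induction ps with
  | nil => intro j k b e h; simp at h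
  | cons p t ih =>
    intro j k b e h
    cases j with
    | zero =>
      simp only [List.getElem?_cons_zero, Option.some_inj] at h
      subst h; simp [pvL]
    | succ j =>
      simp only [List.getElem?_cons_succ] at h
      rcases p with _ | ⟨b0, e0⟩
      · simpa [pvL] using ih j (k + 1) b e h
      · simp only [pvL, List.map_cons, List.mem_cons]
        exact Or.inr (ih j (k + 1) b e h)

-- inner fold: writes do not touch absent indices
lemma pvInner_notmem (occs : List (Nat × List Char)) :
    ∀ (k0 : Nat) (A : PySem.Dict Nat String) (b : List Char) (j : Nat),
    j ∉ occs.map Prod.fst →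
    ((occs.zipIdx k0).foldl (fun A r => A.insert r.1.1 (pvFmt b r.1.2 r.2)) A).get? j
      = A.get? j := by
  induction occs with
  | nil => intro k0 A b j _; simp
  | cons o t ih =>
    intro k0 A b j hj
    simp only [List.map_cons, List.mem_cons] at hj
    push Not at hj
    simp only [List.zipIdx_cons, List.foldl_cons]
    rw [ih (k0 + 1) _ b j hj.2, PySem.Dict.get?_insert]
    simp [hj.1]

-- inner fold: the p-th occurrence (index j, ext e) receives pvFmt b e (k0 + p)
lemma pvInner_mem (occs : List (Nat × List Char)) :
    ∀ (p k0 : Nat) (A : PySem.Dict Nat String) (b e : List Char) (j : Nat),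
    (occs.map Prod.fst).Nodup → occs[p]? = some (j, e) →
    ((occs.zipIdx k0).foldl (fun A r => A.insert r.1.1 (pvFmt b r.1.2 r.2)) A).get? j
      = some (pvFmt b e (k0 + p)) := by
  induction occs with
  | nil => intro p k0 A b e j _ h; simp at h
  | cons o t ih =>
    intro p k0 A b e j hnd h
    simp only [List.map_cons, List.nodup_cons] at hnd
    simp only [List.zipIdx_cons, List.foldl_cons]
    cases p with
    | zero =>
      simp only [List.getElem?_cons_zero, Option.some_inj] at h
      subst h
      rw [pvInner_notmem t (k0 + 1) _ b j hnd.1, PySem.Dict.get?_insert]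
      simp
    | succ p =>
      simp only [List.getElem?_cons_succ] at h
      rw [ih p (k0 + 1) _ b e j hnd.2 h]
      congr 2
      omega

-- the writes of keys other than j's base leave j untouched
lemma pvOuter_preserve (ps : List (Option (List Char × List Char))) (j : Nat) :
    ∀ (K : List String) (A : PySem.Dict Nat String),
    (∀ s' ∈ K, j ∉ (pvGrp ps 0 s').map Prod.fst) →
    (K.foldl (fun A s => pvInnerB (s, pvGrp ps 0 s) A) A).get? j = A.get? j := by
  intro K
  induction K with
  | nil => intro A _; simp
  | cons s K' ih =>
    intro A h
    simp only [List.foldl_cons]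
    rw [ih _ (fun s' hs' => h s' (by simp [hs']))]
    exact pvInner_notmem _ 0 A _ j (h s (by simp))

lemma pvOuter_get (ps : List (Option (List Char × List Char))) (j : Nat)
    (b e : List Char) (hj : ps[j]? = some (some (b, e))) :
    ∀ (K : List String) (A : PySem.Dict Nat String), K.Nodup → String.ofList b ∈ K →
    (K.foldl (fun A s => pvInnerB (s, pvGrp ps 0 s) A) A).get? j
      = some (pvFmt b e (pvCnt (ps.take j) b)) := by
  intro K
  induction K with
  | nil => intro A _ h; simp at h
  | cons s K' ih =>
    intro A hnd hmem
    simp only [List.nodup_cons] at hnd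
    simp only [List.foldl_cons]
    by_cases hs : s = String.ofList b
    · subst hs
      rw [pvOuter_preserve ps j K' _ (fun s' hs' =>
        pvGrp_other_base ps j b e s' hj (fun hh => hnd.1 (hh ▸ hs')))]
      have hget := pvGrp_get ps j 0 b e hj
      have := pvInner_mem (pvGrp ps 0 (String.ofList b)) (pvCnt (ps.take j) b) 0 A b e j
        (pvGrp_nodup_fst ps 0 _) (by simpa using hget)
      simpa [pvInnerB, String.toList_ofList] using this
    · have hmem' : String.ofList b ∈ K' := by
        rcases List.mem_cons.mp hmem with hh | hh
        · exact absurd hh.symm hs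
        · exact hh
      rw [show (pvInnerB (s, pvGrp ps 0 s) A) =
          ((pvGrp ps 0 s).zipIdx.foldl
            (fun A r => A.insert r.1.1 (pvFmt s.toList r.1.2 r.2)) A) from rfl] at *
      exact ih _ hnd.2 hmem'

-- B's reference form: index-by-index over the full list
lemma pvB_ref (names : List String)
    (hsome : ∀ n ∈ names, pvRsplitDot n.toList ≠ none) :
    resolve_duplicate_filenames_alt names =
      (List.range names.length).map (fun i =>
        match (names.map (fun n => pvRsplitDot n.toList))[i]? with
        | some (some (b, e)) =>
            pvFmt b e (pvCnt ((names.map (fun n => pvRsplitDot n.toList)).take i) b)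
        | _ => "") := by
  set ps := names.map (fun n => pvRsplitDot n.toList) with hps
  have hgroups :
      names.zipIdx.foldl pvStepB1 PySem.Dict.empty =
        (pvL ps 0).foldl (fun d p => d.modify p.1 [] (fun v => v ++ [p.2]))
          PySem.Dict.empty := pvFold1_eq names 0 _
  show (List.range names.length).map (fun i =>
      ((names.zipIdx.foldl pvStepB1 PySem.Dict.empty).items.foldl
        (fun A q => pvInnerB q A) PySem.Dict.empty).getD i "") = _
  rw [hgroups]
  have hkeys_nodup :
      ((pvL ps 0).foldl (fun d p => d.modify p.1 [] (fun v => v ++ [p.2]))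
        PySem.Dict.empty).keys.Nodup :=
    PySem.Dict.nodup_keys_foldl_modify_key (pvL ps 0) Prod.fst []
      (fun _ p => fun v => v ++ [p.2]) _ (by simp)
  have hgetD : ∀ s, ((pvL ps 0).foldl (fun d p => d.modify p.1 [] (fun v => v ++ [p.2]))
        PySem.Dict.empty).getD s [] = pvGrp ps 0 s := pvGrp_getD ps
  have hkeys : ((pvL ps 0).foldl (fun d p => d.modify p.1 [] (fun v => v ++ [p.2]))
        PySem.Dict.empty).keys = PySem.Set.ofList ((pvL ps 0).map Prod.fst) := by
    rw [PySem.Dict.keys_foldl_modify_key (pvL ps 0) Prod.fst []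
      (fun _ p => fun v => v ++ [p.2]) _]
    simp [PySem.Dict.keys_empty, PySem.Set.update_nil_left]
  have hitems : ((pvL ps 0).foldl (fun d p => d.modify p.1 [] (fun v => v ++ [p.2]))
        PySem.Dict.empty).items =
      ((pvL ps 0).foldl (fun d p => d.modify p.1 [] (fun v => v ++ [p.2]))
        PySem.Dict.empty).keys.map (fun s => (s, pvGrp ps 0 s)) := by
    rw [PySem.Dict.items_eq_map_keys _ hkeys_nodup []]
    exact List.map_congr_left (fun s _ => by rw [hgetD s])
  rw [hitems, List.foldl_map]
  refine List.map_congr_left (fun i hi => ?_)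
  have hilt : i < names.length := List.mem_range.mp hi
  obtain ⟨nm, hnm⟩ : ∃ nm, names[i]? = some nm := ⟨names[i], by simp [hilt]⟩
  rcases hp : pvRsplitDot nm.toList with _ | ⟨b, e⟩
  · exact absurd hp (hsome nm (List.mem_of_getElem? hnm))
  have hpsi : ps[i]? = some (some (b, e)) := by
    rw [hps, List.getElem?_map, hnm]; simp [hp]
  have hkmem : String.ofList b ∈ ((pvL ps 0).foldl
      (fun d p => d.modify p.1 [] (fun v => v ++ [p.2])) PySem.Dict.empty).keys := by
    rw [hkeys, PySem.Set.mem_ofList]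
    exact pvL_fst_mem ps i 0 b e hpsi
  rw [PySem.Dict.getD_eq_get?_getD,
    pvOuter_get ps i b e hpsi _ PySem.Dict.empty hkeys_nodup hkmem]
  simp [hpsi]


-- the reference form is pvBRec
lemma pvRef_eq_pvBRec (parts : List (Option (List Char × List Char))) :
    ∀ (rest pre : List (Option (List Char × List Char))), pre ++ rest = parts →
    (List.range' pre.length rest.length).map (fun i =>
        match parts[i]? with
        | some (some (b, e)) => pvFmt b e (pvCnt (parts.take i) b)
        | _ => "") = pvBRec pre rest := by
  intro rest
  induction rest with
  | nil => intro pre _; simp [pvBRec]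
  | cons p rs ih =>
    intro pre hfull
    have hget : parts[pre.length]? = some p := by
      rw [← hfull]; simp
    have htake : parts.take pre.length = pre := by
      rw [← hfull]; exact List.take_left
    have hfull' : (pre ++ [p]) ++ rs = parts := by simpa using hfull
    have htail := ih (pre ++ [p]) hfull'
    simp only [List.length_append, List.length_cons, List.length_nil] at htail
    simp only [List.length_cons, List.range'_succ, List.map_cons, pvBRec]
    refine List.cons_eq_cons.mpr ⟨?_, ?_⟩
    · rw [hget, htake]
      rcases p with _ | ⟨b, e⟩ <;> rfl
    · simpa using htail

-- ===== VERDICT (by name: the statement is the Claim_ definition above) =====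
theorem resolve_duplicate_filenames_spec : Claim_equal_resolve_duplicate_filenames := by
  intro names _ hpre
  unfold Spec_resolve_duplicate_filenames
  have hsome : ∀ n ∈ names, pvRsplitDot n.toList ≠ none := by
    intro n hn
    apply pvRsplitDot_ne_none
    simpa using (by
      have := (List.all_eq_true.mp hpre) n hn
      simpa using this)
  have hA : resolve_duplicate_filenames names =
      [] ++ pvBRec [] (names.map (fun n => pvRsplitDot n.toList)) := by
    unfold resolve_duplicate_filenames
    exact pvA_loop names [] PySem.Dict.empty [] hsome pvDict_empty_inv
  have hB : resolve_duplicate_filenames_alt names =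
      pvBRec [] (names.map (fun n => pvRsplitDot n.toList)) := by
    rw [pvB_ref names hsome]
    have := pvRef_eq_pvBRec (names.map (fun n => pvRsplitDot n.toList))
      (names.map (fun n => pvRsplitDot n.toList)) [] (by simp)
    simpa [List.range_eq_range'] using this
  rw [hA, hB]
  simp
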